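-- pv_equiv track=rewrite | github.com/JINAH-Git/Hashtag | 파이썬/감성분석/감성분석 모듈화 완료.py | MakeStopWord
-- ===== SOURCE A (Python) =====
-- def MakeStopWord(list_result, stop_word):
--     final_result = []
--     x = []
--     y = []
--     for i in list_result:
--         a = i[0]    #형용사
--         b = i[1]    #감성분류
--         if a not in stop_word:
--             final_result.append([a,b])
--             x.append(a)
--             y.append(b)
--     return final_result , x, y
-- ===== SOURCE B (Python) =====
-- def MakeStopWord(list_result, stop_word):
--     # divide-and-conquer: split the list, solve both halves, concatenate the triples
--     def go(seg):
--         if len(seg) == 0: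
--             return [], [], []
--         if len(seg) == 1:
--             i = seg[0]
--             a = i[0]
--             if a in stop_word:
--                 return [], [], []
--             b = i[1]
--             return [[a, b]], [a], [b]
--         mid = len(seg) // 2
--         f1, x1, y1 = go(seg[:mid])
--         f2, x2, y2 = go(seg[mid:])
--         return f1 + f2, x1 + x2, y1 + y2
--     return go(list_result)
-- ===== Notes on version B (the rewrite author's own statement) =====
-- stated objective: alternative
-- what changed: Replaces the single left-to-right loop with three synchronized appends by a divide-and-conquer recursion that splits the list in half, solves each half, and concatenates the resulting triples.
import Mathlib
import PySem

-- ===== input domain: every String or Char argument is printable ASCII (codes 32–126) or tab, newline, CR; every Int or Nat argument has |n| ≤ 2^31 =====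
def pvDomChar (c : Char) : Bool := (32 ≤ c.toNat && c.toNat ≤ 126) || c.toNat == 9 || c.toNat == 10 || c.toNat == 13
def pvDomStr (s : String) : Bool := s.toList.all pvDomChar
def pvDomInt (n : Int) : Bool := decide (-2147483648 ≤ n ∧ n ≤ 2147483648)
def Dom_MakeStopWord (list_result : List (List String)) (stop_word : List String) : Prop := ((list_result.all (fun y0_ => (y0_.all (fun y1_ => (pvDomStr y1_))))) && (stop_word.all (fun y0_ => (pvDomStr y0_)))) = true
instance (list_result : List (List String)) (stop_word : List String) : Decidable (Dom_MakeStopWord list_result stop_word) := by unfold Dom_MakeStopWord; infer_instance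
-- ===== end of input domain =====

-- B replaces A's single left-to-right loop with three synchronized appends by a
-- divide-and-conquer recursion: split the list in half, solve each half, concatenate
-- the triples (alternative decomposition, same cost up to a log factor).

-- ===== PORT A =====
-- literal transliteration of A's loop: a and b read up front, then the stopword test
def MakeStopWord (list_result : List (List String)) (stop_word : List String) : List (List String) × List String × List String :=
  list_result.foldl
    (fun (st : List (List String) × List String × List String) i =>
      let a := (PySem.List.pyGet? i 0).getD ""   -- i[0]; Pre_ guarantees it exists
      let b := (PySem.List.pyGet? i 1).getD ""   -- i[1]; Pre_ guarantees it exists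
      if stop_word.contains a then st
      else (st.1 ++ [[a, b]], st.2.1 ++ [a], st.2.2 ++ [b]))
    ([], [], [])

-- ===== PORT B =====
-- Source B's helper go(seg): base cases on length 0 / 1, otherwise split at len//2 and concatenate
def altGo (stop_word : List String) (seg : List (List String)) : List (List String) × List String × List String :=
  if _h0 : seg.length = 0 then ([], [], [])
  else if _h1 : seg.length = 1 then
    let i := (PySem.List.pyGet? seg 0).getD []
    let a := (PySem.List.pyGet? i 0).getD ""    -- i[0]; Pre_ guarantees it exists
    if stop_word.contains a then ([], [], [])
    else
      let b := (PySem.List.pyGet? i 1).getD ""  -- i[1]; Pre_ guarantees it exists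
      ([[a, b]], [a], [b])
  else
    let mid := seg.length / 2
    let r1 := altGo stop_word (seg.take mid)    -- seg[:mid]
    let r2 := altGo stop_word (seg.drop mid)    -- seg[mid:]
    (r1.1 ++ r2.1, r1.2.1 ++ r2.2.1, r1.2.2 ++ r2.2.2)
  termination_by seg.length
  decreasing_by
  · simp only [List.length_take]; omega
  · simp only [List.length_drop]; omega

def MakeStopWord_alt (list_result : List (List String)) (stop_word : List String) : List (List String) × List String × List String :=
  altGo stop_word list_result

-- ===== PRECONDITION & SPEC =====
-- Pre_ excludes exactly the inputs where Python A raises IndexError: A reads i[0] and i[1]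
-- of every row before any test, so every row must have length at least 2.
def Pre_MakeStopWord (list_result : List (List String)) (stop_word : List String) : Prop :=
  (list_result.all (fun i => decide (2 ≤ i.length))) = true
instance (list_result : List (List String)) (stop_word : List String) : Decidable (Pre_MakeStopWord list_result stop_word) := by unfold Pre_MakeStopWord; infer_instance
def pvWitness_MakeStopWord : List (List String) × List String := ([["good", "pos"], ["bad", "neg"]], ["bad"])

def Spec_MakeStopWord (list_result : List (List String)) (stop_word : List String) (out : List (List String) × List String × List String) : Prop := out = MakeStopWord_alt list_result stop_word
instance (list_result : List (List String)) (stop_word : List String) (out : List (List String) × List String × List String) : Decidable (Spec_MakeStopWord list_result stop_word out) := by unfold Spec_MakeStopWord; infer_instance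

-- ===== CLAIM (what is proved, stated in full; the proofs are below) =====
def Claim_equal_MakeStopWord : Prop := ∀ (list_result : List (List String)) (stop_word : List String), Dom_MakeStopWord list_result stop_word → Pre_MakeStopWord list_result stop_word → Spec_MakeStopWord list_result stop_word (MakeStopWord list_result stop_word)

-- ===== LEMMAS AND PROOFS =====

-- abbreviations used only by the proofs
def pvRow (i : List String) : List String :=
  [(PySem.List.pyGet? i 0).getD "", (PySem.List.pyGet? i 1).getD ""]

def pvKeep (stop_word : List String) (i : List String) : Bool :=
  !(stop_word.contains ((PySem.List.pyGet? i 0).getD ""))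

def pvFinal (list_result : List (List String)) (stop_word : List String) : List (List String) :=
  (list_result.filter (pvKeep stop_word)).map pvRow

def pvTriple (l : List (List String)) (sw : List String) : List (List String) × List String × List String :=
  (pvFinal l sw,
   (pvFinal l sw).map (fun p => (PySem.List.pyGet? p 0).getD ""),
   (pvFinal l sw).map (fun p => (PySem.List.pyGet? p 1).getD ""))

-- loop invariant for A: the fold extends the three accumulators by the filtered columns
lemma MakeStopWord_loop (stop_word : List String) :
    ∀ (l : List (List String)) (f : List (List String)) (x y : List String),
      l.foldl
        (fun (st : List (List String) × List String × List String) i =>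
          let a := (PySem.List.pyGet? i 0).getD ""
          let b := (PySem.List.pyGet? i 1).getD ""
          if stop_word.contains a then st
          else (st.1 ++ [[a, b]], st.2.1 ++ [a], st.2.2 ++ [b]))
        (f, x, y)
      = (f ++ (pvTriple l stop_word).1, x ++ (pvTriple l stop_word).2.1, y ++ (pvTriple l stop_word).2.2) := by
  intro l
  induction l with
  | nil => intro f x y; simp [pvTriple, pvFinal]
  | cons i t ih =>
    intro f x y
    by_cases h : stop_word.contains ((PySem.List.pyGet? i 0).getD "") = true
    · have hm : (PySem.List.pyGet? i 0).getD "" ∈ stop_word := by simpa using h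
      simp only [List.foldl_cons, if_pos h]
      rw [ih]
      simp [pvTriple, pvFinal, pvKeep, hm]
    · have hm : ¬ (PySem.List.pyGet? i 0).getD "" ∈ stop_word := by simpa using h
      simp only [List.foldl_cons, if_neg h]
      rw [ih]
      simp [pvTriple, pvFinal, pvKeep, hm, pvRow, List.append_assoc]

-- pvTriple distributes over append (filter and map do)
lemma pvTriple_append (s t : List (List String)) (sw : List String) :
    pvTriple (s ++ t) sw =
      ((pvTriple s sw).1 ++ (pvTriple t sw).1,
       (pvTriple s sw).2.1 ++ (pvTriple t sw).2.1,
       (pvTriple s sw).2.2 ++ (pvTriple t sw).2.2) := by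
  simp [pvTriple, pvFinal, List.filter_append]

-- B's divide-and-conquer computes the filtered triple
lemma altGo_eq (sw : List String) (seg : List (List String)) :
    altGo sw seg = pvTriple seg sw := by
  fun_induction altGo sw seg with
  | case1 seg h0 =>
    have : seg = [] := List.length_eq_zero_iff.mp h0
    subst this; simp [pvTriple, pvFinal]
  | case2 seg h0 h1 i a h =>
    obtain ⟨x, hseg⟩ := List.length_eq_one_iff.mp h1
    have hm : sw.contains ((PySem.List.pyGet? x 0).getD "") = true := by
      simpa [a, i, hseg, PySem.List.pyGet?, PySem.List.pyIdx?] using h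
    have hm' : (PySem.List.pyGet? x 0).getD "" ∈ sw := by simpa using hm
    rw [hseg]
    simp [pvTriple, pvFinal, pvKeep, hm']
  | case3 seg h0 h1 i a h b =>
    obtain ⟨x, hseg⟩ := List.length_eq_one_iff.mp h1
    have hm : sw.contains ((PySem.List.pyGet? x 0).getD "") = false := by
      simpa [a, i, hseg, PySem.List.pyGet?, PySem.List.pyIdx?] using h
    have hab : (([[a, b]], [a], [b]) : List (List String) × List String × List String)
        = ([[(PySem.List.pyGet? x 0).getD "", (PySem.List.pyGet? x 1).getD ""]],
           [(PySem.List.pyGet? x 0).getD ""], [(PySem.List.pyGet? x 1).getD ""]) := by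
      simp [a, b, i, hseg, PySem.List.pyGet?, PySem.List.pyIdx?]
    have hm' : (PySem.List.pyGet? x 0).getD "" ∉ sw := by simpa using hm
    rw [hab, hseg]
    simp [pvTriple, pvFinal, pvKeep, pvRow, hm']
  | case4 seg h0 h1 mid v1 v2 ih1 ih2 =>
    have hsplit : seg.take mid ++ seg.drop mid = seg := List.take_append_drop mid seg
    simp only [v1, v2, ih1, ih2]
    conv_rhs => rw [← hsplit]
    rw [pvTriple_append]

theorem MakeStopWord_eq (list_result : List (List String)) (stop_word : List String) :
    MakeStopWord list_result stop_word = MakeStopWord_alt list_result stop_word := by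
  unfold MakeStopWord MakeStopWord_alt
  rw [MakeStopWord_loop stop_word list_result [] [] [], altGo_eq]
  simp [pvTriple]

-- ===== VERDICT (by name: the statement is the Claim_ definition above) =====
theorem MakeStopWord_spec : Claim_equal_MakeStopWord := by
  intro list_result stop_word _ _
  exact MakeStopWord_eq list_result stop_word
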